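-- pv_equiv track=rewrite | github.com/bamboosingsinwind/interview | interview_code/python/huawei0510-1.py | st_combine
-- ===== SOURCE A (Python) =====
-- def check(st,i):
--     if len(st)==0:
--         return st,i
--     else:
--         # su = sum(st) ##########时间复杂度优化
--         # for j in range(len(st)):
--         #     if i == su:
--         #         st = st[:j]
--         #         i = i*2
--         #         break
--         #     su -= st[j] #############时间复杂度优化，要放到下面
--
--         for j in range(len(st)):
--             if i == sum(st[j:]):
--                 st = st[:j]
--                 i = i*2
--                 break
--     return st,i
--
-- def st_combine(li):
--     st = []
--     for i in li:
--         st,n1 = check(st,i)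
--         while n1!=i and len(st)>0:
--             i = n1
--             st,n1 = check(st,i)
--         st.append(n1)
--     return st
-- ===== SOURCE B (Python) =====
-- def st_combine(li):
--     # B: same stack-combining task, but the suffix-sum match is found with ONE
--     # backward pass keeping a running sum, instead of re-summing st[j:] for each j.
--     st = []
--     for x in li:
--         cur = x
--         while True:
--             su = 0
--             j = len(st)
--             for k in range(len(st) - 1, -1, -1):
--                 su += st[k]
--                 if su == cur:
--                     j = k
--             if j == len(st):
--                 break
--             del st[j:]
--             if cur == 0:
--                 break
--             cur *= 2
--         st.append(cur)
--     return st
-- ===== Notes on version B (the rewrite author's own statement) =====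
-- stated objective: faster
-- what changed: The inner check that re-computes sum(st[j:]) for every j (quadratic per check) is replaced by a single backward pass over the stack with a running suffix sum that records the smallest matching index, and the check/while pair is folded into one collapse loop.
import Mathlib
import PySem

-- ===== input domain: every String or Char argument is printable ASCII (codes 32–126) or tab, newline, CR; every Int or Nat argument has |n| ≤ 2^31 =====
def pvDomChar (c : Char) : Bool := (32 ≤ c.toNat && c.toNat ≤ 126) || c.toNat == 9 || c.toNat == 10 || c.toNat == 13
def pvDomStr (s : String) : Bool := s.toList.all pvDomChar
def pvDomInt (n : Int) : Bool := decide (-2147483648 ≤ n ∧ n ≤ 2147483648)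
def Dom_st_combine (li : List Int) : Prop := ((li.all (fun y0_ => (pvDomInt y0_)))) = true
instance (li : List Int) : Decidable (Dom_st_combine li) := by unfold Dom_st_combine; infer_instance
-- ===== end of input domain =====

-- B replaces A's quadratic check (re-summing st[j:] for every j) by a single
-- backward pass with a running suffix sum; objective: faster (asymptotic).

-- ===== PORT A =====
-- `for j in range(len(st)): if i == sum(st[j:]): st = st[:j]; i = i*2; break`
-- st[j:] with 0 ≤ j is List.drop j; st[:j] is List.take j.
def checkLoopA (st : List Int) (i : Int) (j : Nat) : List Int × Int :=
  if j < st.length then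
    if i = (st.drop j).sum then (st.take j, i * 2)
    else checkLoopA st i (j + 1)
  else (st, i)
termination_by st.length - j

def checkA (st : List Int) (i : Int) : List Int × Int :=
  if st.length = 0 then (st, i) else checkLoopA st i 0

-- the `while n1!=i and len(st)>0` loop; fuel is only a termination bound:
-- every iteration that changes the stack strictly shrinks it, and an
-- iteration that does not change it is the last, so fuel st.length+2 at the
-- call site is provably never exhausted.
def whileA (fuel : Nat) (st : List Int) (i n1 : Int) : List Int × Int :=
  match fuel with
  | 0 => (st, n1)
  | f + 1 =>
    if n1 ≠ i ∧ st ≠ [] then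
      let p := checkA st n1
      whileA f p.1 n1 p.2
    else (st, n1)

def st_combine (li : List Int) : List Int :=
  li.foldl (fun st i =>
    let p := checkA st i
    let q := whileA (st.length + 2) p.1 i p.2
    q.1 ++ [q.2]) []

-- ===== PORT B =====
-- `for k in range(len(st)-1, -1, -1): su += st[k]; if su == cur: j = k`
def scanGoB (st : List Int) (cur : Int) (k : Nat) (su : Int) (j : Nat) : Nat :=
  match k with
  | 0 => j
  | k' + 1 =>
    let su' := su + st.getD k' 0
    scanGoB st cur k' su' (if su' = cur then k' else j)

def scanB (st : List Int) (cur : Int) : Nat :=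
  scanGoB st cur st.length 0 st.length

-- the `while True` collapse loop of Source B; fuel is only a termination bound
-- (each pass through the loop strictly shrinks st), st.length+1 suffices.
def collapseB (fuel : Nat) (st : List Int) (cur : Int) : List Int × Int :=
  match fuel with
  | 0 => (st, cur)
  | f + 1 =>
    let j := scanB st cur
    if j = st.length then (st, cur)
    else
      let st' := st.take j
      if cur = 0 then (st', cur)
      else collapseB f st' (cur * 2)

def st_combine_alt (li : List Int) : List Int :=
  li.foldl (fun st x =>
    let q := collapseB (st.length + 1) st x
    q.1 ++ [q.2]) []

-- ===== PRECONDITION & SPEC =====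
def Spec_st_combine (li : List Int) (out : List Int) : Prop := out = st_combine_alt li
instance (li : List Int) (out : List Int) : Decidable (Spec_st_combine li out) := by unfold Spec_st_combine; infer_instance

-- ===== CLAIM (what is proved, stated in full; the proofs are below) =====
def Claim_equal_st_combine : Prop := ∀ (li : List Int), Dom_st_combine li → Spec_st_combine li (st_combine li)

-- ===== LEMMAS AND PROOFS =====

-- common specification of both inner scans: the first index j with (st.drop j).sum = c
def firstJ (st : List Int) (c : Int) : Option Nat :=
  (List.range st.length).find? (fun j => (st.drop j).sum == c)

lemma checkLoopA_char (st : List Int) (c : Int) :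
    ∀ m j, st.length - j ≤ m → checkLoopA st c j =
      match (List.range' j (st.length - j)).find? (fun k => (st.drop k).sum == c) with
      | some k => (st.take k, c * 2)
      | none => (st, c) := by
  intro m
  induction m with
  | zero =>
    intro j hj
    have h1 : ¬ j < st.length := by omega
    have h2 : st.length - j = 0 := by omega
    unfold checkLoopA
    rw [if_neg h1, h2]
    simp
  | succ m ih =>
    intro j hj
    unfold checkLoopA
    by_cases h : j < st.length
    · rw [if_pos h]
      have hr : st.length - j = (st.length - (j + 1)) + 1 := by omega
      rw [hr, List.range'_succ]
      by_cases he : c = (st.drop j).sum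
      · rw [if_pos he]
        simp [he.symm]
      · rw [if_neg he]
        rw [ih (j + 1) (by omega)]
        have : ((st.drop j).sum == c) = false := by simp [Ne.symm he]
        simp [this]
    · rw [if_neg h]
      have h2 : st.length - j = 0 := by omega
      rw [h2]; simp

lemma scanGoB_char (st : List Int) (c : Int) :
    ∀ k su j, k ≤ st.length → su = (st.drop k).sum →
      scanGoB st c k su j =
        match (List.range k).find? (fun m => (st.drop m).sum == c) with
        | some m => m
        | none => j := by
  intro k
  induction k with
  | zero => intro su j _ _; simp [scanGoB]
  | succ k' ih =>
    intro su j hk hsu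
    have hk' : k' < st.length := by omega
    have hdrop : st.drop k' = st[k'] :: st.drop (k' + 1) :=
      List.drop_eq_getElem_cons hk'
    have hget : st.getD k' 0 = st[k'] := List.getD_eq_getElem st 0 hk'
    have hsu' : su + st.getD k' 0 = (st.drop k').sum := by
      rw [hget, hdrop, List.sum_cons, hsu]; ring
    unfold scanGoB
    rw [ih (su + st.getD k' 0) (if su + st.getD k' 0 = c then k' else j) (by omega) hsu']
    rw [List.range_succ, List.find?_append]
    cases hf : (List.range k').find? (fun m => (st.drop m).sum == c) with
    | some m => simp
    | none =>
      by_cases hp : (st.drop k').sum = c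
      · have h2 : su + st.getD k' 0 = c := by rw [hsu']; exact hp
        simp only [List.getD] at h2
        simp [h2, hp]
      · have h2 : ¬ su + st.getD k' 0 = c := by rw [hsu']; exact hp
        simp only [List.getD] at h2
        simp [h2, hp]

lemma checkA_char (st : List Int) (c : Int) :
    checkA st c = match firstJ st c with
      | some k => (st.take k, c * 2)
      | none => (st, c) := by
  unfold checkA firstJ
  have h := checkLoopA_char st c st.length 0 (by omega)
  rw [Nat.sub_zero] at h
  rw [List.range_eq_range']
  by_cases hl : st.length = 0
  · rw [if_pos hl]; rw [hl]; simp
  · rw [if_neg hl]; rw [h]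

lemma scanB_char (st : List Int) (c : Int) :
    scanB st c = match firstJ st c with
      | some m => m
      | none => st.length := by
  unfold scanB firstJ
  rw [scanGoB_char st c st.length 0 st.length (le_refl _) (by simp)]

lemma firstJ_lt (st : List Int) (c : Int) {j : Nat} (h : firstJ st c = some j) :
    j < st.length := by
  have := List.mem_of_find?_eq_some h
  simpa using this

lemma main_loop (n : Nat) : ∀ (st : List Int) (c : Int) (fA fB : Nat),
    st.length ≤ n → st.length + 2 ≤ fA → st.length + 1 ≤ fB →
    whileA fA (checkA st c).1 c (checkA st c).2 = collapseB fB st c := by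
  induction n with
  | zero =>
    intro st c fA fB hn hA hB
    have hst : st = [] := List.eq_nil_of_length_eq_zero (by omega)
    subst hst
    have hf : firstJ [] c = none := by simp [firstJ]
    obtain ⟨f, rfl⟩ : ∃ f, fA = f + 2 := ⟨fA - 2, by omega⟩
    obtain ⟨g, rfl⟩ : ∃ g, fB = g + 1 := ⟨fB - 1, by omega⟩
    rw [checkA_char, hf]
    simp [whileA, collapseB, scanB_char, hf]
  | succ n ih =>
    intro st c fA fB hn hA hB
    obtain ⟨f, rfl⟩ : ∃ f, fA = f + 1 := ⟨fA - 1, by omega⟩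
    obtain ⟨g, rfl⟩ : ∃ g, fB = g + 1 := ⟨fB - 1, by omega⟩
    rw [checkA_char]
    cases hf : firstJ st c with
    | none =>
      simp [whileA, collapseB, scanB_char, hf]
    | some j =>
      have hj : j < st.length := firstJ_lt st c hf
      have hjl : (st.take j).length = j := by simp; omega
      simp only []
      rw [collapseB]
      simp only [scanB_char, hf]
      rw [if_neg (by omega)]
      by_cases hc : c = 0
      · subst hc
        norm_num [whileA]
      · rw [if_neg hc]
        by_cases hemp : st.take j = []
        · -- j = 0 : while-loop condition fails (empty stack); collapseB recurses once and stops
          rw [whileA]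
          rw [if_neg (by simp [hemp])]
          obtain ⟨g', rfl⟩ : ∃ g', g = g' + 1 := ⟨g - 1, by omega⟩
          have hf0 : firstJ (st.take j) (c * 2) = none := by simp [firstJ, hemp]
          rw [hemp] at *
          simp [collapseB, scanB_char, hf0]
        · rw [whileA]
          rw [if_pos ⟨by intro h; apply hc; omega, hemp⟩]
          exact ih (st.take j) (c * 2) f g (by omega) (by omega) (by omega)

-- ===== VERDICT (by name: the statement is the Claim_ definition above) =====
theorem st_combine_spec : Claim_equal_st_combine := by
  intro li _
  unfold Spec_st_combine st_combine st_combine_alt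
  congr 1
  funext st i
  have h := main_loop st.length st i (st.length + 2) (st.length + 1) (le_refl _) (le_refl _) (le_refl _)
  simp only [h]
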